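-- pv_equiv track=rewrite | github.com/kendeegz/2022_chua_callahan_BOOST_code | Supporting Folder 1 Data Analysis/helpers/general_helpers.py | bin_by_col
-- ===== SOURCE A (Python) =====
-- def bin_by_col(a_matrix, id_col, head_row = 0):
--     """
--     Given a matrix and the id column index, return a number of
--     matrices where the id column is a single value
--     """
--     headers = a_matrix[head_row]
--     parsed = {}
--     i = 0
--     for item in a_matrix:
--         if item == headers:
--             continue
--         elif item[id_col] not in parsed.keys():
--             parsed[item[id_col]] = [item]
--         else:
--             parsed[item[id_col]].append(item)
--         i+=1
--     return {key : [headers] + value for key, value in parsed.items()}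
-- ===== SOURCE B (Python) =====
-- def bin_by_col(a_matrix, id_col, head_row = 0):
--     """Two-pass version: collect distinct ids in first-appearance order,
--     then build each bin by filtering the matrix per key."""
--     headers = a_matrix[head_row]
--     keys = []
--     for row in a_matrix:
--         if row != headers and row[id_col] not in keys:
--             keys.append(row[id_col])
--     return {k: [headers] + [row for row in a_matrix
--                             if row != headers and row[id_col] == k]
--             for k in keys}
-- ===== Notes on version B (the rewrite author's own statement) =====
-- stated objective: alternative
-- what changed: Replaces the single dict-grouping pass with a first pass collecting distinct id values in first-appearance order followed by a per-key filtering comprehension over the matrix.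
import Mathlib
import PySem

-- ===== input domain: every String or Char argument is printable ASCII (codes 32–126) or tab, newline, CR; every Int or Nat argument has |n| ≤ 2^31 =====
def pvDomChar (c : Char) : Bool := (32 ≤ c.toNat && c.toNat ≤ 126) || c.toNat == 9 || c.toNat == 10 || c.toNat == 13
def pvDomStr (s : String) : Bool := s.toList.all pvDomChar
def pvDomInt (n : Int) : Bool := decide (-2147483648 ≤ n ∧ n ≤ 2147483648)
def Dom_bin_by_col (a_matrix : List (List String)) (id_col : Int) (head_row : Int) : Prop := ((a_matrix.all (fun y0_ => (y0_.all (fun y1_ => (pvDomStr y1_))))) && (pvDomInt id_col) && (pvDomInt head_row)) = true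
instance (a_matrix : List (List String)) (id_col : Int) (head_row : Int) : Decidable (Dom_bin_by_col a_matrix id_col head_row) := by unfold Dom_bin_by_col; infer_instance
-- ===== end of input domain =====

-- B replaces A's one-pass dict grouping by a distinct-keys pass plus a per-key
-- filtering comprehension (same exact output; no speed claim).

-- ===== PORT A =====
-- A: headers = a_matrix[head_row]; group the non-header rows into a dict keyed by
-- row[id_col] (append preserves dict position), then prepend headers to each bin.
-- The dead counter `i` of the Python is dropped. Outside Pre_ (index errors) we return [].
def bin_by_col (a_matrix : List (List String)) (id_col : Int) (head_row : Int) : List (String × List (List String)) :=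
  match PySem.List.pyGet? a_matrix head_row with
  | none => []
  | some headers =>
    let parsed : PySem.Dict String (List (List String)) :=
      a_matrix.foldl (fun d item =>
        if item == headers then d
        else if d.contains (PySem.List.pyGetD item id_col "") = false then
          d.insert (PySem.List.pyGetD item id_col "") [item]
        else
          d.modify (PySem.List.pyGetD item id_col "") [] (fun v => v ++ [item]))
        PySem.Dict.empty
    parsed.items.map (fun kv => (kv.1, [headers] ++ kv.2))

-- ===== PORT B =====
def bin_by_col_alt (a_matrix : List (List String)) (id_col : Int) (head_row : Int) : List (String × List (List String)) :=
  match PySem.List.pyGet? a_matrix head_row with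
  | none => []
  | some headers =>
    let keys : PySem.Set String :=
      a_matrix.foldl (fun ks row =>
        if row == headers then ks
        else PySem.Set.add ks (PySem.List.pyGetD row id_col "")) []
    keys.map (fun k =>
      (k, [headers] ++ a_matrix.filter
            (fun row => !(row == headers) && (PySem.List.pyGetD row id_col "" == k))))

-- ===== PRECONDITION & SPEC =====
-- Pre_ excludes exactly the inputs where the Python raises IndexError: head_row
-- out of range for a_matrix, or id_col out of range for some non-header row.
def Pre_bin_by_col (a_matrix : List (List String)) (id_col : Int) (head_row : Int) : Prop :=
  PySem.Raise.InRange a_matrix.length head_row ∧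
  ∀ row ∈ a_matrix, some row ≠ PySem.List.pyGet? a_matrix head_row →
    PySem.Raise.InRange row.length id_col
instance (a_matrix : List (List String)) (id_col : Int) (head_row : Int) : Decidable (Pre_bin_by_col a_matrix id_col head_row) := by unfold Pre_bin_by_col; infer_instance

def pvWitness_bin_by_col : List (List String) × Int × Int :=
  ([["id", "v"], ["a", "1"], ["b", "2"], ["a", "3"]], 0, 0)

def Spec_bin_by_col (a_matrix : List (List String)) (id_col : Int) (head_row : Int) (out : List (String × List (List String))) : Prop := out = bin_by_col_alt a_matrix id_col head_row
instance (a_matrix : List (List String)) (id_col : Int) (head_row : Int) (out : List (String × List (List String))) : Decidable (Spec_bin_by_col a_matrix id_col head_row out) := by unfold Spec_bin_by_col; infer_instance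

-- ===== CLAIM (what is proved, stated in full; the proofs are below) =====
def Claim_equal_bin_by_col : Prop := ∀ (a_matrix : List (List String)) (id_col : Int) (head_row : Int), Dom_bin_by_col a_matrix id_col head_row → Pre_bin_by_col a_matrix id_col head_row → Spec_bin_by_col a_matrix id_col head_row (bin_by_col a_matrix id_col head_row)

-- ===== LEMMAS AND PROOFS =====

-- A's branched dict step is exactly `modify` (append with default []).
theorem step_eq_modify (d : PySem.Dict String (List (List String)))
    (k : String) (item : List String) :
    (if d.contains k = false then d.insert k [item]
     else d.modify k [] (fun v => v ++ [item]))
      = d.modify k [] (fun v => v ++ [item]) := by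
  by_cases h : d.contains k = false
  · simp [h, PySem.Dict.modify, PySem.Dict.getD_of_not_contains d _ h]
  · simp [h]

-- Both ports, after skipping header-equal rows, reduce to the same closed form
-- over rows := a_matrix.filter (· ≠ headers) with key := row[id_col].
theorem bin_by_col_closed (a_matrix : List (List String)) (id_col : Int)
    (headers : List String) :
    (let parsed : PySem.Dict String (List (List String)) :=
      a_matrix.foldl (fun d item =>
        if item == headers then d
        else if d.contains (PySem.List.pyGetD item id_col "") = false then
          d.insert (PySem.List.pyGetD item id_col "") [item]
        else
          d.modify (PySem.List.pyGetD item id_col "") [] (fun v => v ++ [item]))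
        PySem.Dict.empty
     parsed.items.map (fun kv => (kv.1, [headers] ++ kv.2)))
    =
    (let rows := a_matrix.filter (fun r => !(r == headers))
     (PySem.Set.ofList (rows.map (fun r => PySem.List.pyGetD r id_col ""))).map
       (fun k => (k, [headers] ++ rows.filter
          (fun r => PySem.List.pyGetD r id_col "" == k)))) := by
  simp only []
  set key : List String → String := fun r => PySem.List.pyGetD r id_col "" with hkey
  set rows := a_matrix.filter (fun r => !(r == headers)) with hrows
  have hstep : a_matrix.foldl (fun d item =>
        if item == headers then d
        else if d.contains (key item) = false then d.insert (key item) [item]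
        else d.modify (key item) [] (fun v => v ++ [item]))
        (PySem.Dict.empty : PySem.Dict String (List (List String)))
      = rows.foldl (fun d item => d.modify (key item) [] (fun v => v ++ [item]))
          PySem.Dict.empty := by
    have h1 : a_matrix.foldl (fun d item =>
        if item == headers then d
        else if d.contains (key item) = false then d.insert (key item) [item]
        else d.modify (key item) [] (fun v => v ++ [item]))
        (PySem.Dict.empty : PySem.Dict String (List (List String)))
      = a_matrix.foldl (fun d item =>
          if !(item == headers) then d.modify (key item) [] (fun v => v ++ [item]) else d)
          PySem.Dict.empty := by
      apply PySem.List.foldl_congr_mem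
      intro d item _
      by_cases h : item == headers
      · simp [h]
      · simp [h, step_eq_modify]
    rw [h1, PySem.List.foldl_if_eq_foldl_filter (fun r => !(r == headers))]
  rw [hstep]
  have hmapped : rows.foldl (fun d item => d.modify (key item) [] (fun v => v ++ [item]))
        (PySem.Dict.empty : PySem.Dict String (List (List String)))
      = (rows.map (fun r => (key r, r))).foldl
          (fun d p => d.modify p.1 [] (fun v => v ++ [p.2])) PySem.Dict.empty := by
    rw [List.foldl_map]
  set D := rows.foldl (fun d item => d.modify (key item) [] (fun v => v ++ [item]))
      (PySem.Dict.empty : PySem.Dict String (List (List String))) with hD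
  have hnodup : D.keys.Nodup := by
    rw [hD]
    exact PySem.Dict.nodup_keys_foldl_modify_key rows key []
      (fun d x v => v ++ [x]) PySem.Dict.empty (by simp)
  have hkeys : D.keys = PySem.Set.ofList (rows.map key) := by
    rw [hD, PySem.Dict.keys_foldl_modify_key rows key [] (fun d x v => v ++ [x])]
    simp [PySem.Set.update, PySem.Set.ofList_eq_foldl, PySem.Dict.keys_empty]
  have hgetD : ∀ c, D.getD c [] = rows.filter (fun r => key r == c) := by
    intro c
    change D.getD c [] = _
    rw [hmapped, PySem.Dict.getD_foldl_modify_append]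
    simp [PySem.Dict.getD_empty, List.filter_map, Function.comp_def, List.map_map]
  rw [PySem.Dict.items_eq_map_keys D hnodup [], hkeys, List.map_map]
  apply List.map_congr_left
  intro k _
  simp only [Function.comp_def]
  rw [show (List.foldl (fun d item => d.modify (key item) [] fun v => v ++ [item])
        PySem.Dict.empty rows).getD k [] = _ from hgetD k]

theorem bin_by_col_spec : Claim_equal_bin_by_col := by
  intro a_matrix id_col head_row _ _
  unfold Spec_bin_by_col bin_by_col bin_by_col_alt
  cases hh : PySem.List.pyGet? a_matrix head_row with
  | none => rfl
  | some headers =>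
    simp only []
    rw [bin_by_col_closed a_matrix id_col headers]
    simp only []
    have hk : a_matrix.foldl (fun (ks : PySem.Set String) row =>
          if row == headers then ks
          else PySem.Set.add ks (PySem.List.pyGetD row id_col "")) []
        = PySem.Set.ofList ((a_matrix.filter (fun r => !(r == headers))).map
            (fun r => PySem.List.pyGetD r id_col "")) := by
      rw [show (fun (ks : PySem.Set String) row =>
            if row == headers then ks
            else PySem.Set.add ks (PySem.List.pyGetD row id_col ""))
          = (fun ks row => if !(row == headers) then
              PySem.Set.add ks (PySem.List.pyGetD row id_col "") else ks) from by
        funext ks row; by_cases h : row == headers <;> simp [h]]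
      rw [PySem.List.foldl_if_eq_foldl_filter (fun r => !(r == headers)),
        PySem.Set.ofList_eq_foldl, List.foldl_map]
    rw [hk]
    apply List.map_congr_left
    intro k _
    simp [List.filter_filter, Bool.and_comm]
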